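-- pv_equiv track=rewrite | github.com/MinuteMighty/probelab | src/probelab/viz.py | _healthy_streak
-- ===== SOURCE A (Python) =====
-- from typing import Any
--
-- def _healthy_streak(history: list[dict[str, Any]]) -> str:
--     """Count consecutive healthy runs from the end."""
--     count = 0
--     for entry in reversed(history):
--         if entry.get("status") == "healthy":
--             count += 1
--         else:
--             break
--     if count >= 30:
--         return f"({count} runs)"
--     return f"({count} run{'s' if count != 1 else ''})"
-- ===== SOURCE B (Python) =====
-- def _healthy_streak(history: list) -> str:
--     """Count consecutive healthy runs from the end (forward scan)."""
--     count = 0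
--     for entry in history:
--         count = count + 1 if entry.get("status") == "healthy" else 0
--     if count >= 30:
--         return f"({count} runs)"
--     return f"({count} run{'s' if count != 1 else ''})"
-- ===== Notes on version B (the rewrite author's own statement) =====
-- stated objective: alternative
-- what changed: Replaces the reversed-iteration with early break by a single forward scan whose counter resets to 0 on every non-healthy entry, so the final counter is the trailing healthy run length; the formatting tail is unchanged.
import Mathlib
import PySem

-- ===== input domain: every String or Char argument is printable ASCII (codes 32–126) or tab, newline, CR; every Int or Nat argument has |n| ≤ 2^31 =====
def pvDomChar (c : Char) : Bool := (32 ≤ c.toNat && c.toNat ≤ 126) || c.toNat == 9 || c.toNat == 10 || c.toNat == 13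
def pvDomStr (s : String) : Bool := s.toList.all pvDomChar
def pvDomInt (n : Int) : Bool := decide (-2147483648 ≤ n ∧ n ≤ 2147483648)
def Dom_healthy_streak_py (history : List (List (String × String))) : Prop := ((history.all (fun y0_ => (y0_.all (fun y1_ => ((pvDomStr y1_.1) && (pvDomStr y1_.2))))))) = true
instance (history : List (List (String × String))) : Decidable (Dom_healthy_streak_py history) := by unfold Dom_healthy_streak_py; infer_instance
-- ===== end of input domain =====

-- B replaces A's reversed loop with early break by a forward scan whose counter resets on
-- non-healthy entries; same formatting tail. Objective: alternative decomposition.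

-- entry.get("status") == "healthy"  (shared by both sources verbatim)
def pvIsHealthy (entry : List (String × String)) : Bool :=
  (PySem.Dict.mk entry).get? "status" == some "healthy"

-- the shared formatting tail (identical in both Pythons)
def pvFmtStreak (count : Int) : String :=
  if count ≥ 30 then "(" ++ PySem.Int.toStr count ++ " runs)"
  else "(" ++ PySem.Int.toStr count ++ " run" ++ (if count ≠ 1 then "s" else "") ++ ")"

-- ===== PORT A =====
-- A's loop: for entry in reversed(history): count += 1 on healthy, else break
def pvALoop : List (List (String × String)) → Int
  | [] => 0
  | entry :: rest => if pvIsHealthy entry then pvALoop rest + 1 else 0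

def healthy_streak_py (history : List (List (String × String))) : String :=
  pvFmtStreak (pvALoop history.reverse)

-- ===== PORT B =====
-- B's loop: forward fold, counter resets to 0 on non-healthy entries
def healthy_streak_py_alt (history : List (List (String × String))) : String :=
  pvFmtStreak (history.foldl (fun count entry => if pvIsHealthy entry then count + 1 else 0) 0)

-- ===== PRECONDITION & SPEC =====
def Spec_healthy_streak_py (history : List (List (String × String))) (out : String) : Prop := out = healthy_streak_py_alt history
instance (history : List (List (String × String))) (out : String) : Decidable (Spec_healthy_streak_py history out) := by unfold Spec_healthy_streak_py; infer_instance

-- ===== CLAIM (what is proved, stated in full; the proofs are below) =====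
def Claim_equal_healthy_streak_py : Prop := ∀ (history : List (List (String × String))), Dom_healthy_streak_py history → Spec_healthy_streak_py history (healthy_streak_py history)

-- ===== LEMMAS AND PROOFS =====
-- B's forward reset-fold computes the length of the trailing healthy run, i.e. A's loop on the reversed list.
theorem pvFold_eq_aLoop (history : List (List (String × String))) :
    history.foldl (fun count entry => if pvIsHealthy entry then count + 1 else 0) 0
      = pvALoop history.reverse := by
  induction history using List.reverseRecOn with
  | nil => rfl
  | append_singleton l e ih =>
      rw [List.foldl_append, List.reverse_append]
      simp only [List.foldl_cons, List.foldl_nil, List.reverse_cons, List.reverse_nil,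
        List.nil_append, List.singleton_append, pvALoop, ih]


-- ===== VERDICT (by name: the statement is the Claim_ definition above) =====
theorem healthy_streak_py_spec : Claim_equal_healthy_streak_py := by
  intro history _
  unfold Spec_healthy_streak_py healthy_streak_py healthy_streak_py_alt
  rw [pvFold_eq_aLoop]
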